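-- pv_equiv track=rewrite | github.com/dreamson80/Hacktoberfest2024-Open-source- | count_columns_with_all_colors.py | count_columns_with_all_colors
-- ===== SOURCE A (Python) =====
-- def count_columns_with_all_colors(n, rings):
--     # دیکشنری برای ذخیره رنگ‌های حلقه‌ها در هر ستون
--     columns = {i: set() for i in range(10)}
--
--     # پر کردن دیکشنری با رنگ‌های هر ستون
--     for ring in rings:
--         color, column = ring[0], int(ring[1])
--         columns[column].add(color)
--
--     # شمارش ستون‌هایی که هر سه رنگ را دارند
--     count = 0
--     for colors in columns.values():
--         if {'B', 'G', 'W'}.issubset(colors):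
--             count += 1
--
--     return count
-- ===== SOURCE B (Python) =====
-- def count_columns_with_all_colors(n, rings):
--     # For each of the 10 columns, check directly whether each of the three
--     # colors occurs there; no per-column color sets are built.
--     def present(color, c):
--         return any(int(r[1]) == c and r[0] == color for r in rings)
--
--     return sum(1 for c in range(10)
--                if present('B', c) and present('G', c) and present('W', c))
-- ===== Notes on version B (the rewrite author's own statement) =====
-- stated objective: alternative
-- what changed: Replaces A's dict of per-column color sets (built in one pass, then tested with issubset) by direct per-column existence scans: for each column 0-9 it checks with any() whether a ring of each of the three colors lands there, and sums the matches.
import Mathlib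
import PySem

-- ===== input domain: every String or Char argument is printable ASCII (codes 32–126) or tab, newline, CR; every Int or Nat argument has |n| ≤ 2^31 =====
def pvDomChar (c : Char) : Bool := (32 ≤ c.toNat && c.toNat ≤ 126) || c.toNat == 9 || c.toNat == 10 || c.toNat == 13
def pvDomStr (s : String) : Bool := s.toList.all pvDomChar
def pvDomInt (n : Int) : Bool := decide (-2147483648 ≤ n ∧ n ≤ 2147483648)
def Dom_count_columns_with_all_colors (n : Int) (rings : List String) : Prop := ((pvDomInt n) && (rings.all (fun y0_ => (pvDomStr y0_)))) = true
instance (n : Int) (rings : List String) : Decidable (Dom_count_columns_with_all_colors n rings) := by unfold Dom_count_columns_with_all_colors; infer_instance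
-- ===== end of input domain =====

-- B replaces A's dict of per-column color sets by direct per-column/per-color any() scans
-- over the ring list (alternative decomposition, same result; not claimed faster).

-- ===== PORT A =====
-- one iteration of A's ring loop: color, column = ring[0], int(ring[1]); columns[column].add(color)
-- (the 'none' fallthroughs are Python's IndexError / ValueError, excluded by Pre_;
--  'd.insert column ((d.getD column ∅).add color)' is the in-place 'columns[column].add(color)',
--  exact when column is a key of d, which Pre_ guarantees — otherwise Python raises KeyError)
def pvStepA (d : PySem.Dict Int (PySem.Set Char)) (ring : String) : PySem.Dict Int (PySem.Set Char) :=
  match PySem.Str.pyGet? ring 0, PySem.Str.pyGet? ring 1 with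
  | some color, some ch =>
    match PySem.Int.ofChars? [ch] with    -- int(ring[1]) on the one-character string ring[1]
    | some column => d.insert column ((d.getD column PySem.Set.empty).add color)
    | none => d
  | _, _ => d

def count_columns_with_all_colors (n : Int) (rings : List String) : Int :=
  -- columns = {i: set() for i in range(10)}
  let columns0 : PySem.Dict Int (PySem.Set Char) :=
    (PySem.List.pyRange 0 10 1).foldl (fun d i => d.insert i PySem.Set.empty) PySem.Dict.empty
  -- for ring in rings: ...
  let columns := rings.foldl pvStepA columns0
  -- count loop over columns.values()
  columns.values.foldl
    (fun count colors =>
      if PySem.Set.issubset (PySem.Set.ofList ['B', 'G', 'W']) colors then count + 1 else count) 0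

-- ===== PORT B =====
-- present(color, c) = any(int(r[1]) == c and r[0] == color for r in rings)
def pvPresent (color : Char) (c : Int) (rings : List String) : Bool :=
  rings.any (fun r =>
    match PySem.Str.pyGet? r 1, PySem.Str.pyGet? r 0 with
    | some ch, some k => PySem.Int.ofChars? [ch] == some c && k == color
    | _, _ => false)

def count_columns_with_all_colors_alt (n : Int) (rings : List String) : Int :=
  -- sum(1 for c in range(10) if present('B',c) and present('G',c) and present('W',c))
  (((PySem.List.pyRange 0 10 1).filter
      (fun c => pvPresent 'B' c rings && pvPresent 'G' c rings && pvPresent 'W' c rings)).length : Int)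

-- ===== PRECONDITION & SPEC =====
-- Pre_ excludes exactly the inputs on which A raises: a ring of length < 2 (IndexError)
-- or whose second character is not a decimal digit (ValueError from int(ring[1])).
def Pre_count_columns_with_all_colors (n : Int) (rings : List String) : Prop :=
  ∀ r ∈ rings, 2 ≤ r.toList.length ∧ (r.toList.getD 1 ' ').isDigit = true
instance (n : Int) (rings : List String) : Decidable (Pre_count_columns_with_all_colors n rings) := by
  unfold Pre_count_columns_with_all_colors; infer_instance

def pvWitness_count_columns_with_all_colors : Int × List String := (3, ["B0", "G0", "W0", "B3"])

def Spec_count_columns_with_all_colors (n : Int) (rings : List String) (out : Int) : Prop :=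
  out = count_columns_with_all_colors_alt n rings
instance (n : Int) (rings : List String) (out : Int) : Decidable (Spec_count_columns_with_all_colors n rings out) := by
  unfold Spec_count_columns_with_all_colors; infer_instance

-- ===== CLAIM (what is proved, stated in full; the proofs are below) =====
def Claim_equal_count_columns_with_all_colors : Prop :=
  ∀ (n : Int) (rings : List String), Dom_count_columns_with_all_colors n rings →
    Pre_count_columns_with_all_colors n rings →
    Spec_count_columns_with_all_colors n rings (count_columns_with_all_colors n rings)

-- ===== LEMMAS AND PROOFS =====

theorem pv_digit_mem (c : Char) (h : c.isDigit = true) :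
    c ∈ ['0','1','2','3','4','5','6','7','8','9'] := by
  have h1 : 48 ≤ c.toNat ∧ c.toNat ≤ 57 := by
    simp only [Char.isDigit, Bool.and_eq_true, decide_eq_true_eq] at h
    exact ⟨UInt32.le_iff_toNat_le.mp h.1, UInt32.le_iff_toNat_le.mp h.2⟩
  have hc : Char.ofNat c.toNat = c := Char.ofNat_toNat c
  obtain ⟨h1, h2⟩ := h1
  interval_cases hn : c.toNat <;> (rw [← hc]; decide)

theorem pv_digit_val (c : Char) (h : c.isDigit = true) :
    PySem.Int.ofChars? [c] = some ((c.toNat : Int) - 48) := by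
  have := pv_digit_mem c h
  fin_cases this <;> decide

-- the per-ring hit test shared by both counts (this is pvPresent's inner predicate)
def pvRingHit (x : Char) (c : Int) (r : String) : Bool :=
  match PySem.Str.pyGet? r 1, PySem.Str.pyGet? r 0 with
  | some ch, some k => PySem.Int.ofChars? [ch] == some c && k == x
  | _, _ => false

theorem pv_present_eq_any (x : Char) (c : Int) (rings : List String) :
    pvPresent x c rings = rings.any (pvRingHit x c) := rfl

-- what A's ring loop leaves at key c: the colors of the rings that hit column c
theorem pv_getD_fold (rings : List String) (d : PySem.Dict Int (PySem.Set Char)) (c : Int) (x : Char) :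
    (((rings.foldl pvStepA d).getD c PySem.Set.empty).contains x)
      = (((d.getD c PySem.Set.empty).contains x) || rings.any (pvRingHit x c)) := by
  induction rings generalizing d with
  | nil => simp
  | cons r rest ih =>
    simp only [List.foldl_cons, List.any_cons, ih]
    have hstep : ((pvStepA d r).getD c PySem.Set.empty).contains x
        = ((d.getD c PySem.Set.empty).contains x || pvRingHit x c r) := by
      unfold pvStepA pvRingHit
      rcases h0 : PySem.Str.pyGet? r 0 with _ | color
      · simp [h0]
      · rcases h1 : PySem.Str.pyGet? r 1 with _ | ch
        · simp [h0, h1]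
        · rcases hm : PySem.Int.ofChars? [ch] with _ | column
          · simp [h0, h1, hm]
          · simp only [h0, h1, hm]
            by_cases hc : c = column
            · subst hc
              rw [Bool.eq_iff_iff]
              simp [PySem.Dict.getD_insert, PySem.Set.mem_add]
              tauto
            · have hc' : column ≠ c := fun h => hc h.symm
              simp [PySem.Dict.getD_insert, hc, hc']
    rw [hstep, Bool.or_assoc]

-- A's ring loop never adds a key when every ring's column is already one
theorem pv_keys_fold (rings : List String) (d : PySem.Dict Int (PySem.Set Char))
    (h : ∀ r ∈ rings, ∀ ch : Char, PySem.Str.pyGet? r 1 = some ch →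
          ∀ m : Int, PySem.Int.ofChars? [ch] = some m → d.contains m = true) :
    (rings.foldl pvStepA d).keys = d.keys := by
  induction rings generalizing d with
  | nil => rfl
  | cons r rest ih =>
    have hstep_keys : (pvStepA d r).keys = d.keys := by
      unfold pvStepA
      rcases h0 : PySem.Str.pyGet? r 0 with _ | color
      · simp [h0]
      · rcases h1 : PySem.Str.pyGet? r 1 with _ | ch
        · simp [h0, h1]
        · rcases hm : PySem.Int.ofChars? [ch] with _ | column
          · simp [h0, h1, hm]
          · simp only [h0, h1, hm]
            exact PySem.Dict.keys_insert_of_contains d _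
              (h r (by simp) ch h1 column hm)
    have hstep_cont : ∀ m : Int, d.contains m = true → (pvStepA d r).contains m = true := by
      intro m hm'
      have h2 := PySem.Dict.contains_iff_mem_keys (pvStepA d r) m
      rw [hstep_keys] at h2
      exact h2.mpr ((PySem.Dict.contains_iff_mem_keys d m).mp hm')
    simp only [List.foldl_cons]
    rw [ih (pvStepA d r) (fun r' hr' ch h1 m hm =>
      hstep_cont m (h r' (by simp [hr']) ch h1 m hm)), hstep_keys]

-- the initial dict {i: set() for i in range(10)}
theorem pv_getD_init (l : List Int) (d : PySem.Dict Int (PySem.Set Char)) (c : Int)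
    (h : d.getD c PySem.Set.empty = PySem.Set.empty) :
    (l.foldl (fun d i => d.insert i PySem.Set.empty) d).getD c PySem.Set.empty = PySem.Set.empty := by
  induction l generalizing d with
  | nil => exact h
  | cons i rest ih =>
    simp only [List.foldl_cons]
    apply ih
    rw [PySem.Dict.getD_insert]
    split
    · rfl
    · exact h

theorem pv_issubset_bgw (s : PySem.Set Char) :
    PySem.Set.issubset (PySem.Set.ofList ['B', 'G', 'W']) s
      = (s.contains 'B' && s.contains 'G' && s.contains 'W') := by
  show List.all ['B', 'G', 'W'] s.contains = _
  simp [List.all, Bool.and_assoc]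

-- ===== VERDICT (by name: the statement is the Claim_ definition above) =====
theorem count_columns_with_all_colors_spec : Claim_equal_count_columns_with_all_colors := by
  unfold Claim_equal_count_columns_with_all_colors
  intro n rings _hdom hpre
  unfold Spec_count_columns_with_all_colors
  unfold count_columns_with_all_colors count_columns_with_all_colors_alt
  dsimp only
  have hrange : PySem.List.pyRange 0 10 1 = [0, 1, 2, 3, 4, 5, 6, 7, 8, 9] := by decide
  set d0 : PySem.Dict Int (PySem.Set Char) :=
    (PySem.List.pyRange 0 10 1).foldl (fun d i => d.insert i PySem.Set.empty) PySem.Dict.empty with hd0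
  have hkeys0 : d0.keys = [0, 1, 2, 3, 4, 5, 6, 7, 8, 9] := by rw [hd0]; decide
  have hinit : ∀ c : Int, d0.getD c PySem.Set.empty = PySem.Set.empty := by
    intro c
    exact pv_getD_init _ _ c (by simp [PySem.Dict.getD_empty])
  set final := rings.foldl pvStepA d0 with hfinal
  -- every ring's column is a key of d0
  have hkeysF : final.keys = [0, 1, 2, 3, 4, 5, 6, 7, 8, 9] := by
    rw [hfinal, pv_keys_fold rings d0, hkeys0]
    intro r hr ch h1 m hm
    obtain ⟨_, hdig⟩ := hpre r hr
    have h1' : r.toList[1]? = some ch := by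
      have h1'' : PySem.List.pyGet? r.toList 1 = some ch := by simpa using h1
      rw [PySem.List.pyGet?_of_nonneg r.toList (by norm_num)] at h1''
      simpa using h1''
    have hch : r.toList.getD 1 ' ' = ch := by
      simp [List.getD, h1']
    rw [hch] at hdig
    rw [pv_digit_val ch hdig] at hm
    cases hm
    have hb : ch ∈ ['0','1','2','3','4','5','6','7','8','9'] := pv_digit_mem ch hdig
    rw [PySem.Dict.contains_eq_decide_mem_keys, hkeys0]
    fin_cases hb <;> decide
  have hnodup : final.keys.Nodup := by rw [hkeysF]; decide
  have hmem : ∀ (c : Int) (x : Char),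
      (final.getD c PySem.Set.empty).contains x = pvPresent x c rings := by
    intro c x
    rw [hfinal, pv_getD_fold rings d0 c x, hinit c, pv_present_eq_any]
    simp [PySem.Set.empty]
  rw [PySem.Dict.values_eq_map_keys final hnodup PySem.Set.empty, hkeysF, hrange]
  rw [List.foldl_map, PySem.List.foldl_count_if
        (fun c => PySem.Set.issubset (PySem.Set.ofList ['B', 'G', 'W']) (final.getD c PySem.Set.empty)),
      zero_add, ← List.countP_eq_length_filter]
  congr 1
  apply List.countP_congr
  intro c _
  rw [pv_issubset_bgw, hmem c 'B', hmem c 'G', hmem c 'W']
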